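-- pv_equiv track=rewrite | github.com/NFM-Flensburg/Blue-Green-Infrastructure-Balance | plotting.py | unique_labels
-- ===== SOURCE A (Python) =====
-- def unique_labels(labels):
--     counts = {}
--     result = []
--     for label in labels:
--         counts[label] = counts.get(label, 0) + 1
--         if counts[label] == 1:
--             result.append(label)
--         else:
--             result.append(f"{label} ·{counts[label]}")
--     return result
-- ===== SOURCE B (Python) =====
-- def _fmt(label, n):
--     return label if n == 1 else f"{label} \u00b7{n}"
--
-- def unique_labels(labels):
--     positions = {}
--     for i, label in enumerate(labels):
--         positions.setdefault(label, []).append(i)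
--     out = [''] * len(labels)
--     for label, idxs in positions.items():
--         for k, i in enumerate(idxs):
--             out[i] = _fmt(label, k + 1)
--     return out
-- ===== Notes on version B (the rewrite author's own statement) =====
-- stated objective: alternative
-- what changed: Instead of one sequential pass with a running counts dict, B first groups the indices of each label into a dict of position lists, then fills a preallocated output array positionally, writing each label's k-th occurrence (bare for k=0, suffixed otherwise) at its recorded index.
import Mathlib
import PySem

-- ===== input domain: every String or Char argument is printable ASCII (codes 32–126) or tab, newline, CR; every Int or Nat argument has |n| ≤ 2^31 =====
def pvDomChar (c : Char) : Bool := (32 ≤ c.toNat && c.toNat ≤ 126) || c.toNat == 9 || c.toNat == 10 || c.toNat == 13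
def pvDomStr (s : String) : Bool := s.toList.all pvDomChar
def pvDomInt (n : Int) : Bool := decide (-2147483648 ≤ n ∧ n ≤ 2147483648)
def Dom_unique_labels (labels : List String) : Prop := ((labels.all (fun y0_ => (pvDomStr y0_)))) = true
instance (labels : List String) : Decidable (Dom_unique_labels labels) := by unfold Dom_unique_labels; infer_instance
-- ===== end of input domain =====

-- B replaces A's sequential pass with a running counts dict by grouping each label's
-- indices first and then filling a preallocated output array positionally (alternative
-- decomposition, same asymptotic cost).

-- ===== PORT A =====
def unique_labels (labels : List String) : List String :=
  (labels.foldl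
    (fun (st : PySem.Dict String Int × List String) label =>
      let counts := st.1.insert label (st.1.getD label 0 + 1)
      if counts.getD label 0 == 1 then
        (counts, st.2 ++ [label])
      else
        (counts, st.2 ++ [label ++ " ·" ++ PySem.Int.toStr (counts.getD label 0)]))
    (PySem.Dict.empty, [])).2

-- ===== PORT B =====
-- helper _fmt from Source B
def fmtLabel (label : String) (n : Int) : String :=
  if n == 1 then label else label ++ " ·" ++ PySem.Int.toStr n

def unique_labels_alt (labels : List String) : List String :=
  -- positions.setdefault(label, []).append(i)  ≡  modify label [] (· ++ [i])  (in-place append to the dict's list);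
  -- out[i] = _fmt(label, k+1): every index i comes from enumerate(labels), so 0 ≤ i < len(out)
  -- and List.set at i.toNat is exact here
  (((PySem.List.enumerate labels).foldl
      (fun (d : PySem.Dict String (List Int)) p => d.modify p.2 [] (· ++ [p.1])) PySem.Dict.empty).items).foldl
    (fun out q => (PySem.List.enumerate q.2).foldl
        (fun (o : List String) p => o.set p.2.toNat (fmtLabel q.1 (p.1 + 1))) out)
    (List.replicate labels.length "")

-- ===== PRECONDITION & SPEC =====
def Spec_unique_labels (labels : List String) (out : List String) : Prop := out = unique_labels_alt labels
instance (labels : List String) (out : List String) : Decidable (Spec_unique_labels labels out) := by unfold Spec_unique_labels; infer_instance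

-- ===== CLAIM =====
def Claim_equal_unique_labels : Prop := ∀ (labels : List String), Dom_unique_labels labels → Spec_unique_labels labels (unique_labels labels)

-- ===== LEMMAS AND PROOFS =====

/-- Common intermediate: the result list after processing `rest` with prefix `pre` already seen. -/
def pvAux (pre rest : List String) : List String :=
  match rest with
  | [] => []
  | x :: r => fmtLabel x ((pre.count x : Int) + 1) :: pvAux (pre ++ [x]) r

lemma pvA_fold (rest : List String) : ∀ (pre : List String) (acc : List String),
    (rest.foldl
      (fun (st : PySem.Dict String Int × List String) label =>
        let counts := st.1.insert label (st.1.getD label 0 + 1)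
        if counts.getD label 0 == 1 then
          (counts, st.2 ++ [label])
        else
          (counts, st.2 ++ [label ++ " ·" ++ PySem.Int.toStr (counts.getD label 0)]))
      (pre.foldl (fun d x => d.insert x (d.getD x 0 + 1)) PySem.Dict.empty, acc)).2
    = acc ++ pvAux pre rest := by
  induction rest with
  | nil => intro pre acc; simp [pvAux]
  | cons x r ih =>
    intro pre acc
    simp only [List.foldl_cons]
    have hmk : (pre.foldl (fun d x => d.insert x (d.getD x 0 + 1)) (PySem.Dict.empty : PySem.Dict String Int)).insert x
          ((pre.foldl (fun d x => d.insert x (d.getD x 0 + 1)) (PySem.Dict.empty : PySem.Dict String Int)).getD x 0 + 1)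
        = (pre ++ [x]).foldl (fun d x => d.insert x (d.getD x 0 + 1)) PySem.Dict.empty := by
      rw [List.foldl_append, List.foldl_cons, List.foldl_nil]
    have hget : ((pre ++ [x]).foldl (fun d x => d.insert x (d.getD x 0 + 1)) (PySem.Dict.empty : PySem.Dict String Int)).getD x 0
        = (pre.count x : Int) + 1 := by
      rw [PySem.Dict.getD_foldl_insert_add_one]
      simp [List.count_append]
    rw [hmk, hget]
    split_ifs with h1
    · rw [ih (pre ++ [x]) (acc ++ [x])]
      simp [pvAux, fmtLabel, h1]
    · rw [ih (pre ++ [x])]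
      simp only [pvAux, fmtLabel]
      rw [if_neg h1]
      simp

lemma pvAux_length (rest : List String) : ∀ (pre : List String), (pvAux pre rest).length = rest.length := by
  induction rest with
  | nil => intro pre; simp [pvAux]
  | cons x r ih => intro pre; simp [pvAux, ih]

lemma pvAux_getElem? (rest : List String) : ∀ (pre : List String) (i : Nat) (h : i < rest.length),
    (pvAux pre rest)[i]? = some (fmtLabel rest[i] (((pre ++ rest.take i).count rest[i] : Int) + 1)) := by
  induction rest with
  | nil => intro pre i h; simp at h
  | cons x r ih =>
    intro pre i h
    match i with
    | 0 => simp [pvAux]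
    | Nat.succ j =>
      have hj : j < r.length := by simpa using h
      simp only [pvAux, List.getElem?_cons_succ, List.take_succ_cons, List.getElem_cons_succ]
      rw [ih (pre ++ [x]) j hj]
      simp

-- the list of indices of `s` in `labels`, as built by B's grouping pass
def pvIdx (labels : List String) (s : String) : List Int :=
  ((PySem.List.enumerate labels).filter (fun p => p.2 == s)).map (·.1)

lemma pvIdxAux_getElem? (s : String) (rest : List String) : ∀ (t : Int) (i : Nat) (h : i < rest.length),
    rest[i] = s →
    ((((PySem.List.enumerate rest t).filter (fun p => p.2 == s)).map (·.1)))[(rest.take i).count s]? = some (t + i) := by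
  induction rest with
  | nil => intro t i h; simp at h
  | cons x r ih =>
    intro t i h hs
    rw [PySem.List.enumerate_cons]
    match i with
    | 0 =>
      simp only [List.getElem_cons_zero] at hs
      subst hs
      simp
    | Nat.succ j =>
      have hj : j < r.length := by simpa using h
      simp only [List.getElem_cons_succ] at hs
      have ihj := ih (t + 1) j hj hs
      by_cases hx : x = s
      · subst hx
        simp only [List.take_succ_cons, List.filter_cons, beq_self_eq_true, if_true, List.map_cons,
          List.count_cons_self, List.getElem?_cons_succ]
        rw [ihj]
        congr 1
        push_cast
        ring
      · have hxb : (x == s) = false := beq_false_of_ne hx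
        simp only [List.take_succ_cons, List.filter_cons, hxb, Bool.false_eq_true, if_false,
          List.count_cons, add_zero]
        rw [ihj]
        congr 1
        push_cast
        ring

lemma pvIdx_mem (labels : List String) (s : String) (j : Int) (hj : j ∈ pvIdx labels s) :
    ∃ (k : Nat) (h : k < labels.length), j = (k : Int) ∧ labels[k] = s := by
  unfold pvIdx at hj
  obtain ⟨p, hp, hj⟩ := List.mem_map.1 hj
  obtain ⟨hpe, hps⟩ := List.mem_filter.1 hp
  obtain ⟨k, hk, hpk⟩ := (PySem.List.mem_enumerate_iff _ _ _).1 hpe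
  refine ⟨k, hk, ?_, ?_⟩
  · rw [← hj, hpk]
    simp
  · have hp2 : p.2 = s := by simpa using hps
    rw [hpk] at hp2; simpa using hp2

lemma pvIdx_nodup (labels : List String) (s : String) : (pvIdx labels s).Nodup := by
  unfold pvIdx
  have h1 : ((PySem.List.enumerate labels (0:Int)).filter (fun p => p.2 == s)).Pairwise (fun p q => p.1 < q.1) :=
    List.Pairwise.filter _ (PySem.List.pairwise_lt_enumerate labels 0)
  have h2 : (((PySem.List.enumerate labels (0:Int)).filter (fun p => p.2 == s)).map (·.1)).Pairwise (· < ·) := by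
    rw [List.pairwise_map]; exact h1
  exact h2.imp (fun h => ne_of_lt h)

-- B's grouping dict, characterised
lemma positions_getD (labels : List String) (s : String) :
    (((PySem.List.enumerate labels).foldl
      (fun (d : PySem.Dict String (List Int)) p => d.modify p.2 [] (· ++ [p.1])) PySem.Dict.empty).getD s [])
    = pvIdx labels s := by
  have hmap : ((PySem.List.enumerate labels).map (fun p => (p.2, p.1))).foldl
      (fun (d : PySem.Dict String (List Int)) q => d.modify q.1 [] (· ++ [q.2])) PySem.Dict.empty
      = (PySem.List.enumerate labels).foldl
      (fun (d : PySem.Dict String (List Int)) p => d.modify p.2 [] (· ++ [p.1])) PySem.Dict.empty := by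
    rw [List.foldl_map]
  rw [← hmap, PySem.Dict.getD_foldl_modify_append]
  unfold pvIdx
  rw [PySem.Dict.getD_empty, List.filter_map, List.map_map]
  rfl

lemma positions_keys (labels : List String) :
    (((PySem.List.enumerate labels).foldl
      (fun (d : PySem.Dict String (List Int)) p => d.modify p.2 [] (· ++ [p.1])) PySem.Dict.empty).keys)
    = PySem.Set.ofList labels := by
  rw [PySem.Dict.keys_foldl_modify_key]
  simp [PySem.Dict.keys_empty, PySem.List.map_snd_enumerate, PySem.Set.update, PySem.Set.ofList_eq_foldl]

lemma positions_items (labels : List String) :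
    (((PySem.List.enumerate labels).foldl
      (fun (d : PySem.Dict String (List Int)) p => d.modify p.2 [] (· ++ [p.1])) PySem.Dict.empty).items)
    = (PySem.Set.ofList labels).map (fun s => (s, pvIdx labels s)) := by
  have hnd : (((PySem.List.enumerate labels).foldl
      (fun (d : PySem.Dict String (List Int)) p => d.modify p.2 [] (· ++ [p.1])) PySem.Dict.empty).keys).Nodup := by
    rw [positions_keys]
    exact PySem.Set.nodup_ofList labels
  rw [PySem.Dict.items_eq_map_keys _ hnd ([] : List Int), positions_keys]
  apply List.map_congr_left
  intro s _
  rw [positions_getD]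

-- the positional writes performed by B's second pass, flattened
def pvWrites (labels : List String) : List (Nat × String) :=
  ((PySem.Set.ofList labels).map (fun s => (s, pvIdx labels s))).flatMap
    (fun q => (PySem.List.enumerate q.2).map (fun p => (p.2.toNat, fmtLabel q.1 (p.1 + 1))))

lemma foldl_flatMap {α β γ : Type} (l : List α) (g : α → List β) (f : γ → β → γ) (init : γ) :
    (l.flatMap g).foldl f init = l.foldl (fun a x => (g x).foldl f a) init := by
  induction l generalizing init with
  | nil => simp
  | cons x r ih => simp [List.foldl_append, ih]

lemma B_eq_setFold (labels : List String) :
    unique_labels_alt labels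
    = (pvWrites labels).foldl (fun o p => o.set p.1 p.2) (List.replicate labels.length "") := by
  unfold unique_labels_alt pvWrites
  rw [positions_items, foldl_flatMap]
  apply PySem.List.foldl_congr_mem
  intro acc q _
  rw [List.foldl_map]

lemma setFold_length {α : Type} (ws : List (Nat × α)) (out : List α) :
    (ws.foldl (fun o p => o.set p.1 p.2) out).length = out.length := by
  induction ws generalizing out with
  | nil => rfl
  | cons w r ih => simp [ih]

lemma setFold_get_notMem {α : Type} (ws : List (Nat × α)) (out : List α) (i : Nat)
    (h : i ∉ ws.map Prod.fst) :
    (ws.foldl (fun o p => o.set p.1 p.2) out)[i]? = out[i]? := by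
  induction ws generalizing out with
  | nil => rfl
  | cons w r ih =>
    simp only [List.map_cons, List.mem_cons, not_or] at h
    simp only [List.foldl_cons]
    rw [ih _ h.2, List.getElem?_set_ne (fun he => h.1 he.symm)]

lemma setFold_get_mem {α : Type} (ws : List (Nat × α)) (out : List α) (i : Nat) (v : α)
    (hn : (ws.map Prod.fst).Nodup) (hm : (i, v) ∈ ws) (hi : i < out.length) :
    (ws.foldl (fun o p => o.set p.1 p.2) out)[i]? = some v := by
  induction ws generalizing out with
  | nil => simp at hm
  | cons w r ih =>
    simp only [List.map_cons, List.nodup_cons] at hn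
    rcases List.mem_cons.1 hm with he | ht
    · subst he
      simp only [List.foldl_cons]
      rw [setFold_get_notMem _ _ _ hn.1]
      simp [hi]
    · have hifst : i ∈ r.map Prod.fst := List.mem_map.2 ⟨(i, v), ht, rfl⟩
      simp only [List.foldl_cons]
      exact ih (out.set w.1 w.2) hn.2 ht (by simpa using hi)

lemma pvWrites_fst_nodup (labels : List String) : ((pvWrites labels).map Prod.fst).Nodup := by
  unfold pvWrites
  rw [List.map_flatMap]
  have hform : ∀ (q : String × List Int),
      ((PySem.List.enumerate q.2).map (fun p => (p.2.toNat, fmtLabel q.1 (p.1 + 1)))).map Prod.fst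
      = q.2.map Int.toNat := by
    intro q
    rw [List.map_map]
    have h2 : ((fun (p : Nat × String) => p.1) ∘ fun (p : Int × Int) => (p.2.toNat, fmtLabel q.1 (p.1 + 1)))
        = (fun (x : Int) => x.toNat) ∘ (fun (p : Int × Int) => p.2) := rfl
    rw [h2, ← List.map_map, PySem.List.map_snd_enumerate]
  simp only [hform]
  apply List.nodup_flatMap.2
  constructor
  · intro q hq
    obtain ⟨s, hs, rfl⟩ := List.mem_map.1 hq
    refine List.Nodup.map_on ?_ (pvIdx_nodup labels s)
    intro a ha b hb hab
    obtain ⟨ka, _, rfl, _⟩ := pvIdx_mem labels s a ha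
    obtain ⟨kb, _, rfl, _⟩ := pvIdx_mem labels s b hb
    have : ka = kb := by simpa using hab
    simp [this]
  · rw [List.pairwise_map]
    refine List.Pairwise.imp ?_ (PySem.Set.nodup_ofList labels)
    intro a b hab
    intro x hx1 hx2
    obtain ⟨ja, hja, rfl⟩ := List.mem_map.1 hx1
    obtain ⟨jb, hjb, hjba⟩ := List.mem_map.1 hx2
    obtain ⟨ka, hka, rfl, hlab⟩ := pvIdx_mem labels a ja hja
    obtain ⟨kb, hkb, rfl, hlbb⟩ := pvIdx_mem labels b jb hjb
    have hk : kb = ka := by simpa using hjba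
    subst hk
    apply hab
    rw [← hlab, ← hlbb]

lemma pvWrites_mem (labels : List String) (i : Nat) (h : i < labels.length) :
    (i, fmtLabel labels[i] (((labels.take i).count labels[i] : Int) + 1)) ∈ pvWrites labels := by
  unfold pvWrites
  apply List.mem_flatMap.2
  refine ⟨(labels[i], pvIdx labels labels[i]), ?_, ?_⟩
  · exact List.mem_map.2 ⟨labels[i], (PySem.Set.mem_ofList _ _).2 (labels.getElem_mem h), rfl⟩
  · set k := (labels.take i).count labels[i] with hk
    have hidx : (pvIdx labels labels[i])[k]? = some ((0:Int) + i) := by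
      unfold pvIdx
      exact pvIdxAux_getElem? labels[i] labels 0 i h rfl
    have henum : (PySem.List.enumerate (pvIdx labels labels[i]) (0:Int))[k]? = some ((0:Int) + k, (0:Int) + i) := by
      rw [PySem.List.getElem?_enumerate, hidx]
      rfl
    have hmem := List.mem_of_getElem? henum
    apply List.mem_map.2
    refine ⟨((0:Int) + k, (0:Int) + i), hmem, ?_⟩
    simp

-- ===== VERDICT (by name: the statement is the Claim_ definition above) =====
theorem unique_labels_spec : Claim_equal_unique_labels := by
  intro labels _
  unfold Spec_unique_labels
  have hA : unique_labels labels = pvAux [] labels := by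
    unfold unique_labels
    have h := pvA_fold labels [] []
    simp only [List.foldl_nil] at h
    rw [h, List.nil_append]
  rw [hA, B_eq_setFold]
  apply List.ext_getElem?
  intro i
  by_cases h : i < labels.length
  · rw [pvAux_getElem? labels [] i h]
    rw [setFold_get_mem _ _ i _ (pvWrites_fst_nodup labels) (pvWrites_mem labels i h)
      (by simpa using h)]
    simp
  · rw [List.getElem?_eq_none (by rw [pvAux_length]; omega),
      List.getElem?_eq_none (by rw [setFold_length, List.length_replicate]; omega)]
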